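-- pv_equiv track=rewrite | github.com/miliar/Code_Jam_Webscraper | Solutions_in_python/Problem_184/pbB.py | containremove
-- ===== SOURCE A (Python) =====
-- def containremove(S, sub):
-- 	nums = []
-- 	Sr = S[:]
-- 	for c in sub:
-- 		num = Sr.find(c)
-- 		if num == -1:
-- 			return False, S
-- 		else:
-- 			Sr = Sr[:num] + Sr[num+1:]
-- 			#print Sr
-- 			nums.append(num)
--
-- 	return True, Sr
-- ===== SOURCE B (Python) =====
-- def containremove(S, sub):
--     # Count needed occurrences per char, then one pass over S skipping the
--     # first need[c] occurrences of each char c; fail if any need is left over.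
--     need = {}
--     for c in sub:
--         need[c] = need.get(c, 0) + 1
--     out = []
--     for ch in S:
--         k = need.get(ch, 0)
--         if k:
--             need[ch] = k - 1
--         else:
--             out.append(ch)
--     if any(v for v in need.values()):
--         return False, S
--     return True, ''.join(out)
-- ===== Notes on version B (the rewrite author's own statement) =====
-- stated objective: faster
-- what changed: Replaces A's per-sub-char find-and-rebuild scan of S with a character-count dictionary built once and a single pass over S that skips the first need[c] occurrences of each char.
import Mathlib
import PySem

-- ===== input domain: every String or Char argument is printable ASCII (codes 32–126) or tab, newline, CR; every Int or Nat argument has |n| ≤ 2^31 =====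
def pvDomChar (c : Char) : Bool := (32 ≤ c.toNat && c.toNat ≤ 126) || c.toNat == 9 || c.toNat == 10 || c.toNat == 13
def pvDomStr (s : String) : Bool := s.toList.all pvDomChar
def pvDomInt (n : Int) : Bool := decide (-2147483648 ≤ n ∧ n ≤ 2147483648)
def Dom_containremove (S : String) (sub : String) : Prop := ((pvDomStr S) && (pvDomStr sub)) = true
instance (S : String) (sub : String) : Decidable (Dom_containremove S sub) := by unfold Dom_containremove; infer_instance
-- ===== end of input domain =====

-- B replaces A's per-sub-char find-and-rebuild scan of S with a character-count
-- dictionary built once and a single pass over S (objective: faster).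

-- ===== PORT A =====
-- A's loop over sub: num = Sr.find(c); -1 → early return (False, S); else Sr = Sr[:num] + Sr[num+1:].
-- The early return is modelled by the Option result: none = the `return False, S` branch was taken.
def containremoveLoop : List Char → List Char → Option (List Char)
  | Sr, [] => some Sr
  | Sr, c :: rest =>
      let num := PySem.Chars.find Sr [c]
      if num = -1 then none
      else containremoveLoop
        (PySem.List.slice Sr none (some num) ++ PySem.List.slice Sr (some (num + 1)) none) rest

def containremove (S : String) (sub : String) : Bool × String :=
  -- Sr = S[:]
  match containremoveLoop (PySem.List.slice S.toList none none) sub.toList with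
  | none => (false, S)
  | some Sr => (true, String.ofList Sr)

-- ===== PORT B =====
-- one step of B's single pass over S: k = need.get(ch, 0); if k: need[ch] = k - 1 else: out.append(ch)
def containremoveAltPass (st : PySem.Dict Char Int × List Char) (ch : Char) :
    PySem.Dict Char Int × List Char :=
  let k := st.1.getD ch 0
  if k ≠ 0 then (st.1.insert ch (k - 1), st.2) else (st.1, st.2 ++ [ch])

def containremove_alt (S : String) (sub : String) : Bool × String :=
  -- need = {}; for c in sub: need[c] = need.get(c, 0) + 1
  let need : PySem.Dict Char Int :=
    sub.toList.foldl (fun d c => d.insert c (d.getD c 0 + 1)) PySem.Dict.empty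
  -- out = []; for ch in S: …
  let p := S.toList.foldl containremoveAltPass (need, [])
  -- if any(v for v in need.values()): return False, S
  if p.1.values.any (fun v => v != 0) then (false, S)
  else (true, String.ofList p.2)   -- ''.join(out)

-- ===== PRECONDITION & SPEC =====
def Spec_containremove (S : String) (sub : String) (out : Bool × String) : Prop := out = containremove_alt S sub
instance (S : String) (sub : String) (out : Bool × String) : Decidable (Spec_containremove S sub out) := by unfold Spec_containremove; infer_instance

-- ===== CLAIM (what is proved, stated in full; the proofs are below) =====
def Claim_equal_containremove : Prop := ∀ (S : String) (sub : String), Dom_containremove S sub → Spec_containremove S sub (containremove S sub)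

-- ===== LEMMAS AND PROOFS =====

-- The value both programs compute: drop, for each character c, its first (f c) occurrences.
def skipCnt (f : Char → Nat) : List Char → List Char
  | [] => []
  | h :: t => if f h ≠ 0 then skipCnt (fun x => if x = h then f h - 1 else f x) t
              else h :: skipCnt f t

theorem skipCnt_zero : ∀ (l : List Char) (f : Char → Nat), (∀ c, f c = 0) → skipCnt f l = l := by
  intro l
  induction l with
  | nil => intro f _; rfl
  | cons h t ih => intro f hf; simp [skipCnt, hf, ih f hf]

theorem skipCnt_congr (l : List Char) (f g : Char → Nat) (h : ∀ c, f c = g c) :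
    skipCnt f l = skipCnt g l := by
  rw [funext h]

theorem skipCnt_erase (c : Char) :
    ∀ (l : List Char) (f : Char → Nat),
      skipCnt (fun x => if x = c then f x + 1 else f x) l = skipCnt f (l.erase c) := by
  intro l
  induction l with
  | nil => intro f; rfl
  | cons h t ih =>
    intro f
    by_cases hhc : h = c
    · subst hhc
      rw [List.erase_cons_head]
      have h1 : skipCnt (fun x => if x = h then f x + 1 else f x) (h :: t)
          = skipCnt (fun x => if x = h then (if h = h then f h + 1 else f h) - 1
                              else (if x = h then f x + 1 else f x)) t := by
        simp [skipCnt]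
      rw [h1]
      apply skipCnt_congr
      intro x
      by_cases hx : x = h <;> simp [hx]
    · rw [List.erase_cons_tail (by simp [hhc])]
      by_cases hf : f h = 0
      · have h1 : skipCnt (fun x => if x = c then f x + 1 else f x) (h :: t)
            = h :: skipCnt (fun x => if x = c then f x + 1 else f x) t := by
          simp [skipCnt, hhc, hf]
        rw [h1, ih f]
        simp [skipCnt, hf]
      · have h1 : skipCnt (fun x => if x = c then f x + 1 else f x) (h :: t)
            = skipCnt (fun x => if x = h then (if h = c then f h + 1 else f h) - 1
                                else (if x = c then f x + 1 else f x)) t := by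
          simp [skipCnt, hhc, hf]
        rw [h1]
        have h2 : (fun x => if x = h then (if h = c then f h + 1 else f h) - 1
                                else (if x = c then f x + 1 else f x))
            = (fun x => if x = c then (fun y => if y = h then f h - 1 else f y) x + 1
                        else (fun y => if y = h then f h - 1 else f y) x) := by
          funext x
          by_cases hx : x = h <;> by_cases hxc : x = c <;> simp_all
        rw [h2, ih]
        have h3 : skipCnt f (h :: t.erase c)
            = skipCnt (fun x => if x = h then f h - 1 else f x) (t.erase c) := by
          simp [skipCnt, hf]
        rw [h3]

-- take n ++ drop (n+1) at the FIRST occurrence is List.erase.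
theorem eraseIdx_first (l : List Char) (c : Char) :
    ∀ (n : Nat), n < l.length → l[n]? = some c → (∀ i, i < n → l[i]? ≠ some c) →
      l.take n ++ l.drop (n + 1) = l.erase c := by
  induction l with
  | nil => intro n hn; simp at hn
  | cons h t ih =>
    intro n hn h1 h2
    cases n with
    | zero =>
      simp at h1
      subst h1
      simp [List.erase_cons_head]
    | succ m =>
      have hh : h ≠ c := by
        intro heq
        exact h2 0 (Nat.succ_pos m) (by simp [heq])
      rw [List.erase_cons_tail (by simp [hh])]
      simp only [List.take_succ_cons, List.drop_succ_cons, List.cons_append]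
      congr 1
      apply ih m (by simpa using hn) (by simpa using h1)
      intro i hi hne
      exact h2 (i + 1) (by omega) (by simpa using hne)

theorem find_neg_one_iff_not_mem (Sr : List Char) (c : Char) :
    PySem.Chars.find Sr [c] = -1 ↔ c ∉ Sr := by
  rw [PySem.Chars.find_eq_neg_one_iff]
  constructor
  · intro hni hm
    exact hni (by
      obtain ⟨s, t, rfl⟩ := List.append_of_mem hm
      exact ⟨s, t, by simp⟩)
  · intro hm hi
    exact hm (hi.mem (by simp))

-- Characterisation of one successful find/slice step of A: it erases the first occurrence.
theorem stepA (Sr : List Char) (c : Char) (h : c ∈ Sr) :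
    PySem.Chars.find Sr [c] ≠ -1 ∧
    PySem.List.slice Sr none (some (PySem.Chars.find Sr [c])) ++
      PySem.List.slice Sr (some (PySem.Chars.find Sr [c] + 1)) none = Sr.erase c := by
  have hne : PySem.Chars.find Sr [c] ≠ -1 :=
    fun heq => ((find_neg_one_iff_not_mem Sr c).mp heq) h
  have hnn : -1 ≤ PySem.Chars.find Sr [c] := PySem.Chars.neg_one_le_find Sr [c]
  have hpos : 0 ≤ PySem.Chars.find Sr [c] := by omega
  obtain ⟨hpre, hmin⟩ := PySem.Chars.find_spec hpos
  refine ⟨hne, ?_⟩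
  have hfn : PySem.Chars.find Sr [c] = ((PySem.Chars.find Sr [c]).toNat : Int) :=
    (Int.toNat_of_nonneg hpos).symm
  obtain ⟨t, ht⟩ := hpre
  have hget : Sr[(PySem.Chars.find Sr [c]).toNat]? = some c := by
    rw [← List.head?_drop, ← ht]
    rfl
  obtain ⟨hlt, -⟩ := List.getElem?_eq_some_iff.mp hget
  rw [PySem.List.slice_to Sr hpos, PySem.List.slice_from Sr (by omega)]
  have htn : (PySem.Chars.find Sr [c] + 1).toNat = (PySem.Chars.find Sr [c]).toNat + 1 := by
    omega
  rw [htn]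
  apply eraseIdx_first Sr c _ hlt hget
  intro i hi hieq
  apply hmin i hi
  obtain ⟨hilt, hie⟩ := List.getElem?_eq_some_iff.mp hieq
  rw [List.drop_eq_getElem_cons hilt, hie]
  exact ⟨List.drop (i + 1) Sr, rfl⟩

-- A's loop: it succeeds iff every sub-char count fits in Sr, and then returns the skip of the counts.
theorem loopA_char : ∀ (sub Sr : List Char),
    containremoveLoop Sr sub =
      if ∀ c ∈ sub, sub.count c ≤ Sr.count c
      then some (skipCnt (fun c => sub.count c) Sr) else none := by
  intro sub
  induction sub with
  | nil =>
    intro Sr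
    rw [if_pos (by simp)]
    simp only [containremoveLoop]
    rw [skipCnt_zero Sr (fun c => List.count c []) (fun c => by simp)]
  | cons c rest ih =>
    intro Sr
    by_cases hc : c ∈ Sr
    · obtain ⟨hne, heq⟩ := stepA Sr c hc
      have hstep : containremoveLoop Sr (c :: rest) = containremoveLoop (Sr.erase c) rest := by
        simp only [containremoveLoop, if_neg hne, heq]
      rw [hstep, ih]
      have hcond : (∀ x ∈ rest, rest.count x ≤ (Sr.erase c).count x)
          ↔ (∀ x ∈ c :: rest, (c :: rest).count x ≤ Sr.count x) := by
        constructor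
        · intro H x hx
          by_cases hxc : x = c
          · subst hxc
            have hpos : 0 < Sr.count x := List.count_pos_iff.mpr hc
            by_cases hxr : x ∈ rest
            · have := H x hxr
              rw [List.count_erase_self] at this
              simp only [List.count_cons_self]
              omega
            · have h0 : rest.count x = 0 := List.count_eq_zero.mpr hxr
              simp only [List.count_cons_self]
              omega
          · have hxr : x ∈ rest := by
              rcases List.mem_cons.mp hx with h' | h'
              · exact absurd h' hxc
              · exact h'
            have := H x hxr
            rw [List.count_erase_of_ne hxc] at this
            rw [List.count_cons_of_ne (Ne.symm hxc)]
            exact this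
        · intro H x hx
          by_cases hxc : x = c
          · subst hxc
            have := H x List.mem_cons_self
            rw [List.count_cons_self] at this
            rw [List.count_erase_self]
            omega
          · have := H x (List.mem_cons_of_mem c hx)
            rw [List.count_cons_of_ne (Ne.symm hxc)] at this
            rw [List.count_erase_of_ne hxc]
            exact this
      by_cases hcnd : ∀ x ∈ c :: rest, (c :: rest).count x ≤ Sr.count x
      · rw [if_pos (hcond.mpr hcnd), if_pos hcnd]
        have hfe : skipCnt (fun x => (c :: rest).count x) Sr
            = skipCnt (fun x => if x = c then rest.count x + 1 else rest.count x) Sr := by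
          apply skipCnt_congr
          intro x
          by_cases hxc : x = c
          · subst hxc; simp [List.count_cons_self]
          · simp [List.count_cons_of_ne (Ne.symm hxc), hxc]
        rw [hfe, skipCnt_erase c Sr (fun x => rest.count x)]
      · rw [if_neg (fun h' => hcnd (hcond.mp h')), if_neg hcnd]
    · have hne : PySem.Chars.find Sr [c] = -1 := (find_neg_one_iff_not_mem Sr c).mpr hc
      have hstep : containremoveLoop Sr (c :: rest) = none := by
        simp only [containremoveLoop, if_pos hne]
      rw [hstep, if_neg]
      intro H
      have hle := H c List.mem_cons_self
      have h0 : Sr.count c = 0 := List.count_eq_zero.mpr hc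
      rw [List.count_cons_self] at hle
      omega

-- B's single pass, characterised: kept output = skipCnt of the budgets, final budgets are
-- truncated differences, and the key set is untouched.
theorem altPass_spec : ∀ (l : List Char) (d : PySem.Dict Char Int) (out : List Char) (g : Char → Nat),
    (∀ c, d.getD c 0 = (g c : Int)) →
    (l.foldl containremoveAltPass (d, out)).2 = out ++ skipCnt g l
    ∧ (∀ c, (l.foldl containremoveAltPass (d, out)).1.getD c 0 = ((g c - l.count c : Nat) : Int))
    ∧ (l.foldl containremoveAltPass (d, out)).1.keys = d.keys := by
  intro l
  induction l with
  | nil =>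
    intro d out g hg
    refine ⟨by simp [skipCnt], fun c => by simpa using hg c, rfl⟩
  | cons ch t ih =>
    intro d out g hg
    by_cases hgz : g ch = 0
    · have hstep : containremoveAltPass (d, out) ch = (d, out ++ [ch]) := by
        simp [containremoveAltPass, hg ch, hgz]
      rw [List.foldl_cons, hstep]
      obtain ⟨h2, h3, h4⟩ := ih d (out ++ [ch]) g hg
      refine ⟨?_, ?_, h4⟩
      · rw [h2]
        simp [skipCnt, hgz]
      · intro c
        rw [h3 c]
        congr 1
        by_cases hc : c = ch
        · subst hc
          rw [List.count_cons_self]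
          omega
        · rw [List.count_cons_of_ne (Ne.symm hc)]
    · have hk : d.getD ch 0 ≠ 0 := by
        rw [hg ch]
        exact_mod_cast hgz
      have hstep : containremoveAltPass (d, out) ch = (d.insert ch (d.getD ch 0 - 1), out) := by
        simp [containremoveAltPass, hk]
      have hcontains : d.contains ch = true := by
        cases hcon : d.contains ch with
        | true => rfl
        | false => exact absurd (PySem.Dict.getD_of_not_contains d 0 hcon) hk
      have hg' : ∀ c, (d.insert ch (d.getD ch 0 - 1)).getD c 0
          = (((fun x => if x = ch then g ch - 1 else g x) c : Nat) : Int) := by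
        intro c
        by_cases hc : c = ch
        · rw [hc, PySem.Dict.getD_insert_self, hg ch]
          have hb : (fun x => if x = ch then g ch - 1 else g x) ch = g ch - 1 := by simp
          rw [hb]
          omega
        · rw [PySem.Dict.getD_insert_of_ne d _ _ hc, hg c]
          simp [hc]
      obtain ⟨h2, h3, h4⟩ := ih (d.insert ch (d.getD ch 0 - 1)) out
        (fun x => if x = ch then g ch - 1 else g x) hg'
      rw [List.foldl_cons, hstep]
      refine ⟨?_, ?_, ?_⟩
      · rw [h2]
        simp [skipCnt, hgz]
      · intro c
        rw [h3 c]
        congr 1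
        by_cases hc : c = ch
        · rw [hc, if_pos rfl, List.count_cons_self]
          omega
        · rw [if_neg hc, List.count_cons_of_ne (Ne.symm hc)]
      · rw [h4, PySem.Dict.keys_insert_of_contains d _ hcontains]

-- B, characterised the same way as A's loop.
theorem containremove_alt_eq (S sub : String) :
    containremove_alt S sub =
      if ∀ c ∈ sub.toList, sub.toList.count c ≤ S.toList.count c
      then (true, String.ofList (skipCnt (fun c => sub.toList.count c) S.toList))
      else (false, S) := by
  unfold containremove_alt
  simp only [PySem.Dict.foldl_insert_getD_add_one_eq_counter]
  have hg : ∀ c, (PySem.Dict.counter sub.toList).getD c 0 = ((sub.toList.count c : Nat) : Int) :=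
    fun c => PySem.Dict.getD_counter sub.toList c
  obtain ⟨h2, h3, h4⟩ :=
    altPass_spec S.toList (PySem.Dict.counter sub.toList) [] (fun c => sub.toList.count c) hg
  set p := S.toList.foldl containremoveAltPass (PySem.Dict.counter sub.toList, []) with hp
  have hkeys : p.1.keys = PySem.Set.ofList sub.toList := by
    rw [h4, PySem.Dict.keys_counter]
  have hnd : p.1.keys.Nodup := by
    rw [hkeys]
    exact PySem.Set.nodup_ofList sub.toList
  have hany : (p.1.values.any (fun v => v != 0)) = true
      ↔ ¬ (∀ c ∈ sub.toList, sub.toList.count c ≤ S.toList.count c) := by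
    rw [PySem.Dict.values_eq_map_keys p.1 hnd 0, List.any_map, List.any_eq_true]
    constructor
    · rintro ⟨k, hkmem, hkv⟩ hall
      rw [hkeys, PySem.Set.mem_ofList] at hkmem
      have := hall k hkmem
      simp only [Function.comp, h3 k, bne_iff_ne, ne_eq] at hkv
      have hz : sub.toList.count k - S.toList.count k = 0 := by omega
      rw [hz] at hkv
      exact hkv (by norm_num)
    · intro hnall
      push_neg at hnall
      obtain ⟨k, hkmem, hklt⟩ := hnall
      refine ⟨k, ?_, ?_⟩
      · rw [hkeys, PySem.Set.mem_ofList]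
        exact hkmem
      · simp only [Function.comp, h3 k, bne_iff_ne, ne_eq]
        intro hcast
        have : sub.toList.count k - S.toList.count k = 0 := by exact_mod_cast hcast
        omega
  by_cases hcnd : ∀ c ∈ sub.toList, sub.toList.count c ≤ S.toList.count c
  · have hfalse : (p.1.values.any (fun v => v != 0)) = false := by
      rw [Bool.eq_false_iff]
      intro htrue
      exact (hany.mp htrue) hcnd
    rw [if_pos hcnd]
    simp only [hfalse, Bool.false_eq_true, if_false]
    rw [h2]
    simp
  · have htrue : (p.1.values.any (fun v => v != 0)) = true := by
      by_contra hft
      rw [Bool.not_eq_true] at hft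
      exact hcnd (by
        by_contra hn
        exact absurd (hany.mpr hn) (by simp [hft]))
    rw [if_neg hcnd]
    simp [htrue]

-- ===== VERDICT (by name: the statement is the Claim_ definition above) =====
theorem containremove_spec : Claim_equal_containremove := by
  intro S sub _
  unfold Spec_containremove
  rw [containremove_alt_eq]
  unfold containremove
  rw [PySem.List.slice_none_none, loopA_char]
  by_cases h : ∀ c ∈ sub.toList, sub.toList.count c ≤ S.toList.count c
  · rw [if_pos h, if_pos h]
  · rw [if_neg h, if_neg h]
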